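-- pv_equiv track=rewrite | github.com/tencent-ailab/Leopard | Pai-Megatron-Patch/megatron_patch/data/idefics2/mm_pretrain_dataset.py | get_answer_mask
-- ===== SOURCE A (Python) =====
-- def get_answer_mask(input_ids, eos_token_id=32002):
--     answer_mask = [0] * len(input_ids)
--
--     # iterate over the indices of a and update b accordingly
--     count = 0
--     start = -1
--     for i in range(len(input_ids)):
--         if input_ids[i] == eos_token_id:
--             count += 1
--             if count % 2 == 1:
--                 start = i
--             else:
--                 # "<end_of_utterance>\nAssistant:"
--                 # [32002, 28705,    13,  7226, 11143, 28747]
--                 for j in range(min(start+6, len(answer_mask)-1), i+1):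
--                     answer_mask[j] = 1
--
--     # if in the end count is an odd number:
--     # indicating that the answer may be truncated
--     if count % 2 == 1:
--         for j in range(min(start+6, len(answer_mask)-1), len(answer_mask)):
--             answer_mask[j] = 1
--
--     return answer_mask
-- ===== SOURCE B (Python) =====
-- def get_answer_mask(input_ids, eos_token_id=32002):
--     n = len(input_ids)
--     pos = [i for i, t in enumerate(input_ids) if t == eos_token_id]
--     bounds = [(min(pos[k] + 6, n - 1), pos[k + 1] + 1) for k in range(0, len(pos) - 1, 2)]
--     if len(pos) % 2 == 1:
--         bounds.append((min(pos[-1] + 6, n - 1), n))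
--     out = []
--     for lo, hi in bounds:
--         out += [0] * (lo - len(out))
--         out += [1] * (hi - len(out))
--     out += [0] * (n - len(out))
--     return out
-- ===== Notes on version B (the rewrite author's own statement) =====
-- stated objective: alternative
-- what changed: Replaces A's running count/parity state machine with in-place marking of a zero mask by: one pass collecting eos positions, an explicit pairwise list of (lo,hi) interval bounds, and building the output afresh by concatenating 0-run / 1-run segments (no mutation).
import Mathlib
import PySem

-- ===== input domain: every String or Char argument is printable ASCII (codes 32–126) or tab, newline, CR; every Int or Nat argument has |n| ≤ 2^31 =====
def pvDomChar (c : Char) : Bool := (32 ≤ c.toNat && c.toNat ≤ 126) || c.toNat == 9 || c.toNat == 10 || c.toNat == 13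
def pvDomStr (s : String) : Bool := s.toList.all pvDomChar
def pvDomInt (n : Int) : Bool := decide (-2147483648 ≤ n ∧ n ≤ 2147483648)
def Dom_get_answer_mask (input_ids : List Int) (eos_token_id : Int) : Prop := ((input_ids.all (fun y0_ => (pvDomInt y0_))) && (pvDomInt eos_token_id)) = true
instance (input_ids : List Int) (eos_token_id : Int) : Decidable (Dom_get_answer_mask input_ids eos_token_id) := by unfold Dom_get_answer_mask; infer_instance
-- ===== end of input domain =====

-- B replaces A's count/parity state machine over the token stream by an explicit list of
-- eos positions, pairwise (lo,hi) interval bounds, and a mask built by concatenating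
-- 0-run/1-run segments instead of mutating a zero array (alternative decomposition, same cost).

-- ===== PORT A =====
def get_answer_mask (input_ids : List Int) (eos_token_id : Int) : List Int :=
  let answer_mask : List Int := PySem.List.pyRepeat [(0 : Int)] (input_ids.length : Int)
  let st := (PySem.List.pyRange 0 (input_ids.length : Int) 1).foldl
    (fun (st : Int × Int × List Int) i =>
      if PySem.List.pyGetD input_ids i 0 = eos_token_id then
        let count := st.1 + 1
        if count % 2 = 1 then (count, i, st.2.2)
        else (count, st.2.1,
          (PySem.List.pyRange (min (st.2.1 + 6) ((st.2.2.length : Int) - 1)) (i + 1) 1).foldl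
            (fun m j => PySem.List.pySetD m j (1 : Int)) st.2.2)
      else st)
    ((0 : Int), (-1 : Int), answer_mask)
  if st.1 % 2 = 1 then
    (PySem.List.pyRange (min (st.2.1 + 6) ((st.2.2.length : Int) - 1)) (st.2.2.length : Int) 1).foldl
      (fun m j => PySem.List.pySetD m j (1 : Int)) st.2.2
  else st.2.2

-- ===== PORT B =====
def get_answer_mask_alt (input_ids : List Int) (eos_token_id : Int) : List Int :=
  let n : Int := input_ids.length
  let pos : List Int := ((PySem.List.enumerate input_ids 0).filter (fun p => p.2 == eos_token_id)).map (·.1)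
  let bounds : List (Int × Int) :=
    (PySem.List.pyRange 0 ((pos.length : Int) - 1) 2).map
      (fun k => (min (PySem.List.pyGetD pos k 0 + 6) (n - 1), PySem.List.pyGetD pos (k + 1) 0 + 1))
  let bounds := if (pos.length : Int) % 2 = 1 then
      bounds ++ [(min (PySem.List.pyGetD pos (-1) 0 + 6) (n - 1), n)]
    else bounds
  let out := bounds.foldl
    (fun (out : List Int) b =>
      let out := out ++ PySem.List.pyRepeat [(0 : Int)] (b.1 - (out.length : Int))
      out ++ PySem.List.pyRepeat [(1 : Int)] (b.2 - (out.length : Int)))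
    []
  out ++ PySem.List.pyRepeat [(0 : Int)] (n - (out.length : Int))

-- ===== PRECONDITION & SPEC =====
def Spec_get_answer_mask (input_ids : List Int) (eos_token_id : Int) (out : List Int) : Prop := out = get_answer_mask_alt input_ids eos_token_id
instance (input_ids : List Int) (eos_token_id : Int) (out : List Int) : Decidable (Spec_get_answer_mask input_ids eos_token_id out) := by unfold Spec_get_answer_mask; infer_instance

-- ===== CLAIM (what is proved, stated in full; the proofs are below) =====
def Claim_equal_get_answer_mask : Prop := ∀ (input_ids : List Int) (eos_token_id : Int), Dom_get_answer_mask input_ids eos_token_id → Spec_get_answer_mask input_ids eos_token_id (get_answer_mask input_ids eos_token_id)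

-- ===== LEMMAS AND PROOFS =====

-- mark [lo,hi) with 1s (A's inner loop shape)
def markR (m : List Int) (lo hi : Int) : List Int :=
  (PySem.List.pyRange lo hi 1).foldl (fun m j => PySem.List.pySetD m j (1 : Int)) m

-- A's per-eos event (the then-branch of A's loop body)
def evA (st : Int × Int × List Int) (i : Int) : Int × Int × List Int :=
  let count := st.1 + 1
  if count % 2 = 1 then (count, i, st.2.2)
  else (count, st.2.1, markR st.2.2 (min (st.2.1 + 6) ((st.2.2.length : Int) - 1)) (i + 1))

def finishA (st : Int × Int × List Int) : List Int :=
  if st.1 % 2 = 1 then markR st.2.2 (min (st.2.1 + 6) ((st.2.2.length : Int) - 1)) (st.2.2.length : Int)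
  else st.2.2

-- A folded two eos positions at a time
def AfinalF : List Int → List Int → List Int
  | m, [] => m
  | m, [p] => markR m (min (p + 6) ((m.length : Int) - 1)) (m.length : Int)
  | m, p :: q :: r => AfinalF (markR m (min (p + 6) ((m.length : Int) - 1)) (q + 1)) r

-- B's pairwise bounds, as a recursion
def pairsOf (n : Int) : List Int → List (Int × Int)
  | [] => []
  | [p] => [(min (p + 6) (n - 1), n)]
  | p :: q :: r => (min (p + 6) (n - 1), q + 1) :: pairsOf n r

def cov (bounds : List (Int × Int)) (j : Int) : Bool :=
  bounds.any (fun b => b.1 ≤ j && j < b.2)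

def chainOk (n : Int) : Int → List (Int × Int) → Prop
  | _, [] => True
  | c, b :: r => c ≤ b.1 ∧ b.1 < n ∧ b.2 ≤ n ∧ chainOk n (max b.1 b.2) r

theorem foldl_filter_if {α β : Type} (P : α → Prop) [DecidablePred P] (f : β → α → β) :
    ∀ (l : List α) (init : β),
      l.foldl (fun st x => if P x then f st x else st) init
        = (l.filter (fun x => decide (P x))).foldl f init := by
  intro l
  induction l with
  | nil => intro init; rfl
  | cons x xs ih =>
    intro init
    by_cases h : P x <;> simp [h, ih]

theorem length_foldl_pySetD (l : List Int) : ∀ (m : List Int),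
    (l.foldl (fun m j => PySem.List.pySetD m j (1 : Int)) m).length = m.length := by
  induction l with
  | nil => intro m; rfl
  | cons x xs ih => intro m; simp [List.foldl_cons, ih, PySem.List.length_pySetD]

theorem length_markR (m : List Int) (lo hi : Int) : (markR m lo hi).length = m.length := by
  unfold markR; exact length_foldl_pySetD _ m

theorem markR_getElem?_aux (hi : Int) : ∀ (k : Nat) (m : List Int) (lo : Int), 0 ≤ lo →
    hi ≤ (m.length : Int) → (hi - lo).toNat = k →
    ∀ j : Nat, (markR m lo hi)[j]? =
      if lo ≤ (j : Int) ∧ (j : Int) < hi then some 1 else m[j]? := by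
  intro k
  induction k with
  | zero =>
    intro m lo hlo hhi hk j
    have hle : hi ≤ lo := by omega
    unfold markR
    rw [PySem.List.pyRange_one_eq_nil hle]
    simp only [List.foldl_nil]
    rw [if_neg (by omega)]
  | succ k ih =>
    intro m lo hlo hhi hk j
    have hlt : lo < hi := by omega
    unfold markR
    rw [PySem.List.pyRange_one_cons hlt]
    simp only [List.foldl_cons]
    have hstep : (PySem.List.pyRange (lo + 1) hi 1).foldl
        (fun m j => PySem.List.pySetD m j (1 : Int)) (PySem.List.pySetD m lo 1)
        = markR (PySem.List.pySetD m lo 1) (lo + 1) hi := rfl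
    rw [hstep]
    have hset : PySem.List.pySetD m lo (1 : Int) = m.set lo.toNat 1 :=
      PySem.List.pySetD_of_nonneg m 1 hlo
    have hlen : ((m.set lo.toNat (1 : Int)).length : Int) = (m.length : Int) := by simp
    rw [ih _ _ (by omega) (by rw [hset, hlen]; exact hhi) (by omega) j]
    rw [hset]
    rw [List.getElem?_set]
    have hcast : (lo.toNat : Int) = lo := Int.toNat_of_nonneg hlo
    split_ifs <;> first | rfl | (exfalso; omega)

theorem markR_getElem? (m : List Int) (lo hi : Int) (hlo : 0 ≤ lo) (hhi : hi ≤ (m.length : Int)) :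
    ∀ j : Nat, (markR m lo hi)[j]? =
      if lo ≤ (j : Int) ∧ (j : Int) < hi then some 1 else m[j]? :=
  markR_getElem?_aux hi (hi - lo).toNat m lo hlo hhi rfl

theorem foldl_evA_pairs (m pos) : ∀ (c s : Int), c % 2 = 0 →
    finishA (pos.foldl evA (c, s, m)) = AfinalF m pos := by
  induction m, pos using AfinalF.induct with
  | case1 m =>
    intro c s hc
    simp only [List.foldl_nil, finishA, AfinalF]
    rw [if_neg (by omega)]
  | case2 m p =>
    intro c s hc
    have h1 : (c + 1) % 2 = 1 := by omega
    simp only [List.foldl_cons, List.foldl_nil, evA, h1, if_pos, AfinalF, finishA]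
  | case3 m p q r ih =>
    intro c s hc
    have h1 : (c + 1) % 2 = 1 := by omega
    have h2 : ¬ ((c + 1 + 1) % 2 = 1) := by omega
    simp only [List.foldl_cons, evA, h1, if_pos, if_neg h2, AfinalF]
    exact ih (c + 1 + 1) p (by omega)

theorem AfinalF_getElem? (m pos) :
    (∀ p ∈ pos, 0 ≤ p ∧ p < (m.length : Int)) →
    (AfinalF m pos).length = m.length ∧
      ∀ j : Nat, (AfinalF m pos)[j]? =
        if cov (pairsOf (m.length : Int) pos) j then some 1 else m[j]? := by
  induction m, pos using AfinalF.induct with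
  | case1 m =>
    intro _
    refine ⟨rfl, fun j => ?_⟩
    simp [AfinalF, pairsOf, cov]
  | case2 m p =>
    intro hb
    obtain ⟨hp0, hpn⟩ := hb p (by simp)
    have hlo : (0 : Int) ≤ min (p + 6) ((m.length : Int) - 1) := by omega
    refine ⟨length_markR _ _ _, ?_⟩
    intro j
    rw [show AfinalF m [p] = markR m (min (p + 6) ((m.length : Int) - 1)) (m.length : Int) from rfl]
    rw [markR_getElem? m _ _ hlo (le_refl _) j]
    simp only [pairsOf, cov, List.any_cons, List.any_nil, Bool.or_false,
      Bool.and_eq_true, decide_eq_true_eq]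
  | case3 m p q r ih =>
    intro hb
    obtain ⟨hp0, hpn⟩ := hb p (by simp)
    obtain ⟨hq0, hqn⟩ := hb q (by simp)
    have hlo : (0 : Int) ≤ min (p + 6) ((m.length : Int) - 1) := by omega
    have hlen' : (markR m (min (p + 6) ((m.length : Int) - 1)) (q + 1)).length = m.length :=
      length_markR _ _ _
    have hbr : ∀ x ∈ r, 0 ≤ x ∧ x <
        ((markR m (min (p + 6) ((m.length : Int) - 1)) (q + 1)).length : Int) := by
      intro x hx
      rw [hlen']
      exact hb x (by simp [hx])
    obtain ⟨ihlen, ihget⟩ := ih hbr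
    rw [show AfinalF m (p :: q :: r)
        = AfinalF (markR m (min (p + 6) ((m.length : Int) - 1)) (q + 1)) r from rfl]
    refine ⟨by rw [ihlen, hlen'], ?_⟩
    intro j
    rw [ihget j, hlen']
    rw [markR_getElem? m _ _ hlo (by omega) j]
    rw [show pairsOf (m.length : Int) (p :: q :: r)
        = (min (p + 6) ((m.length : Int) - 1), q + 1) :: pairsOf (m.length : Int) r from rfl]
    simp only [cov, List.any_cons, Bool.or_eq_true, Bool.and_eq_true, decide_eq_true_eq,
      List.any_eq_true]
    by_cases hcov : ∃ x ∈ pairsOf (m.length : Int) r, x.1 ≤ (j : Int) ∧ (j : Int) < x.2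
    · rw [if_pos hcov, if_pos (Or.inr hcov)]
    · rw [if_neg hcov]
      by_cases hI : min (p + 6) ((m.length : Int) - 1) ≤ (j : Int) ∧ (j : Int) < q + 1
      · rw [if_pos hI, if_pos (Or.inl hI)]
      · rw [if_neg hI, if_neg (fun h => h.elim hI hcov)]

-- B's fold step
def stepB (out : List Int) (b : Int × Int) : List Int :=
  let out1 := out ++ PySem.List.pyRepeat [(0 : Int)] (b.1 - (out.length : Int))
  out1 ++ PySem.List.pyRepeat [(1 : Int)] (b.2 - (out1.length : Int))

-- B's bounds construction (as in the port)
def bnds (n : Int) (pos : List Int) : List (Int × Int) :=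
  let bounds :=
    (PySem.List.pyRange 0 ((pos.length : Int) - 1) 2).map
      (fun k => (min (PySem.List.pyGetD pos k 0 + 6) (n - 1), PySem.List.pyGetD pos (k + 1) 0 + 1))
  if (pos.length : Int) % 2 = 1 then
    bounds ++ [(min (PySem.List.pyGetD pos (-1) 0 + 6) (n - 1), n)]
  else bounds

theorem pyRange2_pos (b : Int) (hb : 0 < b) :
    PySem.List.pyRange 0 b 2 = (List.range ((b + 1) / 2).toNat).map
      (fun k => ((2 * k : Nat) : Int)) := by
  rw [PySem.List.pyRange_of_pos 0 b (by norm_num), if_pos hb]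
  have h : ((b - 0 + 2 - 1) / 2).toNat = ((b + 1) / 2).toNat := by omega
  rw [h]
  apply List.map_congr_left
  intro k _
  push_cast
  ring

theorem pyRange2_nonpos (b : Int) (hb : b ≤ 0) : PySem.List.pyRange 0 b 2 = [] := by
  rw [PySem.List.pyRange_of_pos 0 b (by norm_num), if_neg (by omega)]
  rfl

theorem bnds_eq_pairsOf (n : Int) : ∀ (pos : List Int), bnds n pos = pairsOf n pos := by
  intro pos
  induction pos using pairsOf.induct with
  | case1 =>
    unfold bnds
    rw [pyRange2_nonpos _ (by simp)]
    simp [pairsOf]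
  | case2 p =>
    unfold bnds
    rw [pyRange2_nonpos _ (by simp)]
    simp [pairsOf, PySem.List.pyGetD_neg_one ([p]) 0 (by simp)]
  | case3 p q r ih =>
    have hlen : (((p :: q :: r).length : Int)) - 1 = (r.length : Int) + 1 := by
      simp only [List.length_cons]; push_cast; ring
    have hmap :
        (PySem.List.pyRange 0 (((p :: q :: r).length : Int) - 1) 2).map
          (fun k => (min (PySem.List.pyGetD (p :: q :: r) k 0 + 6) (n - 1),
                     PySem.List.pyGetD (p :: q :: r) (k + 1) 0 + 1))
        = (min (p + 6) (n - 1), q + 1) ::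
          (PySem.List.pyRange 0 ((r.length : Int) - 1) 2).map
            (fun k => (min (PySem.List.pyGetD r k 0 + 6) (n - 1),
                       PySem.List.pyGetD r (k + 1) 0 + 1)) := by
      rw [hlen, pyRange2_pos _ (by positivity)]
      have hM : (((r.length : Int) + 1 + 1) / 2).toNat = r.length / 2 + 1 := by omega
      rw [hM, List.range_succ_eq_map, List.map_cons, List.map_map, List.map_cons, List.map_map]
      simp only [Function.comp_def, Nat.succ_eq_add_one]
      congr 1
      · have e0 : ((2 * 0 : Nat) : Int) = ((0 : Nat) : Int) := by norm_num
        have e1 : ((2 * 0 : Nat) : Int) + 1 = ((1 : Nat) : Int) := by norm_num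
        simp only [e0, e1, PySem.List.pyGetD_natCast]
        rfl
      · by_cases hr : 0 < (r.length : Int) - 1
        · rw [pyRange2_pos _ hr, List.map_map]
          have hMr : (((r.length : Int) - 1 + 1) / 2).toNat = r.length / 2 := by omega
          rw [hMr]
          apply List.map_congr_left
          intro k _
          simp only [Function.comp_def]
          have e1 : ((2 * (k + 1) : Nat) : Int) = ((2 * k + 2 : Nat) : Int) := by push_cast; ring
          have e2 : ((2 * k + 2 : Nat) : Int) + 1 = ((2 * k + 3 : Nat) : Int) := by push_cast; ring
          have e3 : ((2 * k : Nat) : Int) + 1 = ((2 * k + 1 : Nat) : Int) := by push_cast; ring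
          rw [e1, e2, e3, PySem.List.pyGetD_natCast, PySem.List.pyGetD_natCast,
              PySem.List.pyGetD_natCast, PySem.List.pyGetD_natCast]
          have g1 : (p :: q :: r).getD (2 * k + 2) 0 = r.getD (2 * k) 0 := by
            rw [show 2 * k + 2 = (2 * k) + 1 + 1 by omega]
            rw [List.getD_cons_succ, List.getD_cons_succ]
          have g2 : (p :: q :: r).getD (2 * k + 3) 0 = r.getD (2 * k + 1) 0 := by
            rw [show 2 * k + 3 = (2 * k + 1) + 1 + 1 by omega]
            rw [List.getD_cons_succ, List.getD_cons_succ]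
          rw [g1, g2]
        · rw [pyRange2_nonpos _ (by omega)]
          have h0 : r.length / 2 = 0 := by omega
          rw [h0]
          rfl
    show bnds n (p :: q :: r) = pairsOf n (p :: q :: r)
    rw [show pairsOf n (p :: q :: r) = (min (p + 6) (n - 1), q + 1) :: pairsOf n r from rfl, ← ih]
    unfold bnds
    simp only
    by_cases hodd : ((r.length : Int)) % 2 = 1
    · have hodd' : (((p :: q :: r).length : Int)) % 2 = 1 := by
        simp only [List.length_cons]; push_cast; omega
      rw [if_pos hodd', if_pos hodd, hmap]
      have hrne : r ≠ [] := by
        intro h; rw [h] at hodd; norm_num at hodd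
      have htr : PySem.List.pyGetD (p :: q :: r) (-1) 0 = PySem.List.pyGetD r (-1) 0 := by
        rw [PySem.List.pyGetD_neg_one _ _ (by simp), PySem.List.pyGetD_neg_one _ _ hrne]
        rw [List.getLast_cons (show (q :: r) ≠ [] by simp), List.getLast_cons hrne]
      rw [htr]
      rfl
    · have hodd' : ¬ ((((p :: q :: r).length : Int)) % 2 = 1) := by
        simp only [List.length_cons]; push_cast; omega
      rw [if_neg hodd', if_neg hodd, hmap]

theorem cov_false_of_lt (n : Int) : ∀ (bs : List (Int × Int)) (c j : Int),
    chainOk n c bs → j < c → cov bs j = false := by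
  intro bs
  induction bs with
  | nil => intro c j _ _; rfl
  | cons b r ih =>
    intro c j hc hj
    obtain ⟨h1, _, _, h4⟩ := hc
    simp only [cov, List.any_cons, Bool.or_eq_false_iff]
    constructor
    · simp only [Bool.and_eq_false_iff, decide_eq_false_iff_not]
      left; omega
    · exact ih (max b.1 b.2) j h4 (by omega)

theorem map_pyRange_const (a b : Int) (f : Int → Int) (c : Int)
    (h : ∀ j, a ≤ j → j < b → f j = c) :
    (PySem.List.pyRange a b 1).map f = List.replicate (b - a).toNat c := by
  have h1 : (PySem.List.pyRange a b 1).map f = (PySem.List.pyRange a b 1).map (fun _ => c) :=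
    List.map_congr_left (fun x hx => by
      rw [PySem.List.mem_pyRange_one] at hx
      exact h x hx.1 hx.2)
  rw [h1, List.map_const', PySem.List.length_pyRange_one]

theorem foldlB_eq (n : Int) : ∀ (bs : List (Int × Int)) (out : List Int),
    chainOk n (out.length : Int) bs → (out.length : Int) ≤ n →
    (bs.foldl stepB out) ++
        PySem.List.pyRepeat [(0 : Int)] (n - ((bs.foldl stepB out).length : Int))
      = out ++ (PySem.List.pyRange (out.length : Int) n 1).map
          (fun j => if cov bs j then (1 : Int) else 0) := by
  intro bs
  induction bs with
  | nil =>
    intro out _ hle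
    simp only [List.foldl_nil, PySem.List.pyRepeat_singleton]
    rw [show (fun j => if cov [] j then (1 : Int) else 0) = (fun _ => (0 : Int)) by
      funext j; simp [cov]]
    rw [List.map_const', PySem.List.length_pyRange_one]
  | cons b rest ih =>
    intro out hchain hle
    obtain ⟨h1, h2, h3, h4⟩ := hchain
    have hnn : (0 : Int) ≤ b.1 - (out.length : Int) := by omega
    have hstep : stepB out b
        = out ++ List.replicate (b.1 - (out.length : Int)).toNat 0
              ++ List.replicate (b.2 - b.1).toNat 1 := by
      unfold stepB
      simp only [PySem.List.pyRepeat_singleton]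
      have hl : (((out ++ List.replicate (b.1 - (out.length : Int)).toNat 0).length : Int)) = b.1 := by
        simp only [List.length_append, List.length_replicate]
        push_cast
        omega
      rw [hl]
    have hlen1 : (((stepB out b).length : Int)) = max b.1 b.2 := by
      rw [hstep]
      simp only [List.length_append, List.length_replicate]
      push_cast
      omega
    have hchain' : chainOk n (((stepB out b).length : Int)) rest := by rw [hlen1]; exact h4
    have hle' : (((stepB out b).length : Int)) ≤ n := by rw [hlen1]; omega
    simp only [List.foldl_cons]
    rw [ih (stepB out b) hchain' hle']
    rw [PySem.List.pyRange_one_append (out.length : Int) b.1 n h1 (by omega),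
        PySem.List.pyRange_one_append b.1 (max b.1 b.2) n (by omega) (by omega)]
    rw [List.map_append, List.map_append]
    have hseg1 : (PySem.List.pyRange (out.length : Int) b.1 1).map
        (fun j => if cov (b :: rest) j then (1 : Int) else 0)
        = List.replicate (b.1 - (out.length : Int)).toNat 0 := by
      apply map_pyRange_const
      intro j hj1 hj2
      have hcb : cov (b :: rest) j = false := by
        simp only [cov, List.any_cons, Bool.or_eq_false_iff]
        refine ⟨by simp only [Bool.and_eq_false_iff, decide_eq_false_iff_not]; left; omega, ?_⟩
        exact cov_false_of_lt n rest (max b.1 b.2) j h4 (by omega)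
      rw [hcb]
      rfl
    have hseg2 : (PySem.List.pyRange b.1 (max b.1 b.2) 1).map
        (fun j => if cov (b :: rest) j then (1 : Int) else 0)
        = List.replicate (b.2 - b.1).toNat 1 := by
      have hc : ∀ j, b.1 ≤ j → j < max b.1 b.2 →
          (if cov (b :: rest) j then (1 : Int) else 0) = 1 := by
        intro j hj1 hj2
        have : cov (b :: rest) j = true := by
          simp only [cov, List.any_cons, Bool.or_eq_true, Bool.and_eq_true, decide_eq_true_eq]
          left; exact ⟨hj1, by omega⟩
        rw [this]
        rfl
      rw [map_pyRange_const _ _ _ 1 hc]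
      congr 1
      omega
    have hseg3 : (PySem.List.pyRange (max b.1 b.2) n 1).map
        (fun j => if cov (b :: rest) j then (1 : Int) else 0)
        = (PySem.List.pyRange (max b.1 b.2) n 1).map
            (fun j => if cov rest j then (1 : Int) else 0) := by
      apply List.map_congr_left
      intro j hj
      rw [PySem.List.mem_pyRange_one] at hj
      have : (decide (b.1 ≤ j) && decide (j < b.2)) = false := by
        simp only [Bool.and_eq_false_iff, decide_eq_false_iff_not]
        right; omega
      simp only [cov, List.any_cons, this, Bool.false_or]
      rfl
    rw [hseg1, hseg2, hseg3, hlen1, hstep]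
    simp [List.append_assoc]

theorem chainOk_pairsOf (n : Int) (pos) : ∀ (c : Int),
    pos.Pairwise (· < ·) → (∀ p ∈ pos, 0 ≤ p ∧ p < n) →
    c ≤ n - 1 → (∀ p ∈ pos, c ≤ p + 6) →
    chainOk n c (pairsOf n pos) := by
  induction pos using pairsOf.induct with
  | case1 => intro c _ _ _ _; trivial
  | case2 p =>
    intro c _ hb hc1 hc2
    obtain ⟨hp0, hpn⟩ := hb p (by simp)
    exact ⟨by have := hc2 p (by simp); omega, by omega, le_refl _, trivial⟩
  | case3 p q r ih =>
    intro c hpw hb hc1 hc2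
    obtain ⟨hp0, hpn⟩ := hb p (by simp)
    obtain ⟨hq0, hqn⟩ := hb q (by simp)
    have hpq : p < q := (List.pairwise_cons.mp hpw).1 q (by simp)
    have hqr : ∀ x ∈ r, q < x := by
      have := (List.pairwise_cons.mp hpw).2
      exact fun x hx => (List.pairwise_cons.mp this).1 x hx
    refine ⟨?_, by omega, by omega, ?_⟩
    · have := hc2 p (by simp); omega
    · rcases r with _ | ⟨x, r'⟩
      · trivial
      · apply ih
        · exact ((List.pairwise_cons.mp (List.pairwise_cons.mp hpw).2).2)
        · exact fun y hy => hb y (by simp [hy])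
        · have hx := hb x (by simp)
          have := hqr x (by simp)
          omega
        · intro y hy
          have := hqr y hy
          omega

theorem pos_eq_filter (xs : List Int) (e : Int) :
    ((PySem.List.enumerate xs 0).filter (fun p => p.2 == e)).map (·.1)
      = (PySem.List.pyRange 0 (xs.length : Int) 1).filter
          (fun j => decide (PySem.List.pyGetD xs j 0 = e)) := by
  rw [PySem.List.enumerate_eq_map_pyRange xs 0]
  rw [List.filter_map, List.map_map]
  simp [Function.comp_def, PySem.List.len, beq_eq_decide]

-- ===== VERDICT (by name: the statement is the Claim_ definition above) =====
theorem get_answer_mask_spec : Claim_equal_get_answer_mask := by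
  intro xs e _
  unfold Spec_get_answer_mask
  set P : List Int := (PySem.List.pyRange 0 (xs.length : Int) 1).filter
      (fun j => decide (PySem.List.pyGetD xs j 0 = e)) with hPdef
  have hPmem : ∀ p ∈ P, 0 ≤ p ∧ p < (xs.length : Int) := by
    intro p hp
    rw [hPdef, List.mem_filter] at hp
    have := (PySem.List.mem_pyRange_one).mp hp.1
    omega
  -- A side
  have hA : get_answer_mask xs e = AfinalF (List.replicate xs.length (0 : Int)) P := by
    show finishA ((PySem.List.pyRange 0 (xs.length : Int) 1).foldl
        (fun st i => if PySem.List.pyGetD xs i 0 = e then evA st i else st)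
        ((0 : Int), (-1 : Int), PySem.List.pyRepeat [(0 : Int)] (xs.length : Int)))
      = AfinalF (List.replicate xs.length (0 : Int)) P
    rw [foldl_filter_if (fun i => PySem.List.pyGetD xs i 0 = e) evA]
    rw [foldl_evA_pairs _ _ 0 (-1) (by norm_num)]
    rw [PySem.List.pyRepeat_singleton, Int.toNat_natCast]
  have hm0 : ((List.replicate xs.length (0 : Int)).length : Int) = (xs.length : Int) := by simp
  have HP : ∀ p ∈ P, 0 ≤ p ∧ p < ((List.replicate xs.length (0 : Int)).length : Int) := by
    rw [hm0]; exact hPmem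
  obtain ⟨hAlen, hAget⟩ := AfinalF_getElem? (List.replicate xs.length (0 : Int)) P HP
  -- B side
  have hB : get_answer_mask_alt xs e
      = (pairsOf (xs.length : Int) P).foldl stepB [] ++
          PySem.List.pyRepeat [(0 : Int)]
            ((xs.length : Int) - (((pairsOf (xs.length : Int) P).foldl stepB []).length : Int)) := by
    show (let out := (bnds (xs.length : Int)
          (((PySem.List.enumerate xs 0).filter (fun p => p.2 == e)).map (·.1))).foldl stepB [];
        out ++ PySem.List.pyRepeat [(0 : Int)] ((xs.length : Int) - (out.length : Int)))
      = _
    rw [pos_eq_filter xs e, ← hPdef, bnds_eq_pairsOf]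
  have hchain : chainOk (xs.length : Int) ((([] : List Int).length : Int)) (pairsOf (xs.length : Int) P) := by
    rcases hP : P with _ | ⟨p0, P'⟩
    · trivial
    · rw [← hP]
      apply chainOk_pairsOf
      · exact (PySem.List.pairwise_lt_pyRange_one _ _).filter _
      · exact hPmem
      · have h0 := hPmem p0 (by rw [hP]; simp)
        simp only [List.length_nil, Nat.cast_zero]
        omega
      · intro p hp
        have := hPmem p hp
        simp only [List.length_nil, Nat.cast_zero]
        omega
  have hB2 : get_answer_mask_alt xs e
      = ([] : List Int) ++ (PySem.List.pyRange ((([] : List Int).length : Int)) (xs.length : Int) 1).map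
          (fun j => if cov (pairsOf (xs.length : Int) P) j then (1 : Int) else 0) := by
    rw [hB]
    exact foldlB_eq (xs.length : Int) (pairsOf (xs.length : Int) P) []
      hchain (by simp)
  rw [hA, hB2]
  apply List.ext_getElem?
  intro j
  by_cases hj : j < xs.length
  · rw [hAget j]
    simp only [List.length_nil, Nat.cast_zero, List.nil_append, List.getElem?_map,
      PySem.List.getElem?_pyRange_one]
    rw [if_pos (by omega : j < ((xs.length : Int) - 0).toNat)]
    simp only [Option.map_some, zero_add]
    rw [List.getElem?_replicate, if_pos hj]
    by_cases hcov : cov (pairsOf ((List.replicate xs.length (0 : Int)).length : Int) P) (j : Int) = true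
    · rw [if_pos hcov]
      rw [hm0] at hcov
      rw [if_pos hcov]
    · rw [if_neg hcov]
      rw [hm0] at hcov
      rw [if_neg hcov]
  · have h1 : (AfinalF (List.replicate xs.length (0 : Int)) P)[j]? = none := by
      rw [List.getElem?_eq_none]
      rw [hAlen, List.length_replicate]
      omega
    have h2 : (([] : List Int) ++ (PySem.List.pyRange ((([] : List Int).length : Int)) (xs.length : Int) 1).map
        (fun j => if cov (pairsOf (xs.length : Int) P) j then (1 : Int) else 0))[j]? = none := by
      rw [List.getElem?_eq_none]
      simp [PySem.List.length_pyRange_one]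
      omega
    rw [h1, h2]
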